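-- pv_equiv track=rewrite | github.com/mvillalons/Gestor-ALM-App | pages/05_parser.py | _opciones_posicion
-- ===== SOURCE A (Python) =====
-- _CLASES_EMOJI = {
--     "Ingreso_Recurrente": "💰",
--     "Pasivo_Estructural": "🏠",
--     "Activo_Financiero": "📈",
--     "Activo_Liquido": "🏦",
--     "Activo_Real": "🏡",
--     "Prevision_AFP": "🔵",
--     "Objetivo_Ahorro": "🎯",
--     "Otro": "🗂️",
-- }
--
-- _TIPOS_PASIVO_COMPROMISO = {"Colegio", "Jardín", "Arriendo", "Otro"}
--
-- def emoji_clase(pos: dict) -> str: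
--     """Retorna emoji según la clase de la posición."""
--     clase = pos.get("Clase", "")
--     if clase == "Pasivo_Corto_Plazo":
--         tipo = pos.get("Tipo", pos.get("Tipo_Pasivo", ""))
--         if tipo in _TIPOS_PASIVO_COMPROMISO:
--             return "📚"
--         return "💳"
--     return _CLASES_EMOJI.get(clase, "🗂️")
--
-- def _opciones_posicion(posiciones: dict) -> list[tuple[str, str]]:
--     """
--     Retorna lista de (id, label) ordenada por clase para el selectbox.
--     """
--     orden_clase = {
--         "Ingreso_Recurrente": 0,
--         "Pasivo_Estructural": 1,
--         "Pasivo_Corto_Plazo": 2,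
--         "Activo_Liquido": 3,
--         "Activo_Financiero": 4,
--         "Activo_Real": 5,
--         "Prevision_AFP": 6,
--         "Objetivo_Ahorro": 7,
--         "Otro": 8,
--     }
--     items = []
--     for pid, params in posiciones.items():
--         if pid.startswith("GAS_") or pid == "OTR_NO_CLASIFICADO":
--             continue
--         clase = params.get("Clase", "Otro")
--         desc = params.get("Descripcion", pid)
--         em = emoji_clase(params)
--         label = f"{em} {desc} [{pid}]"
--         items.append((pid, label, orden_clase.get(clase, 9)))
--
--     items.sort(key=lambda x: (x[2], x[1]))
--     result = [(pid, lbl) for pid, lbl, _ in items]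
--     result.append(("SIN_CLASIFICAR", "❓ Sin clasificar"))
--     result.append(("OTR_NO_CLASIFICADO", "🗂️ Agregar a Otros"))
--     return result
-- ===== SOURCE B (Python) =====
-- # B: online insertion sort — each surviving position is placed directly into its
-- # sorted slot as it is scanned (one combined clase -> (rank, emoji) table), instead
-- # of building a flat list and sorting it afterwards by the (rank, label) tuple.
--
-- _RANGO = {
--     "Ingreso_Recurrente": (0, "💰"),
--     "Pasivo_Estructural": (1, "🏠"),
--     "Activo_Liquido": (3, "🏦"),
--     "Activo_Financiero": (4, "📈"),
--     "Activo_Real": (5, "🏡"),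
--     "Prevision_AFP": (6, "🔵"),
--     "Objetivo_Ahorro": (7, "🎯"),
--     "Otro": (8, "🗂️"),
-- }
--
-- def _clave(pid, params):
--     clase = params.get("Clase", "Otro")
--     if clase == "Pasivo_Corto_Plazo":
--         tipo = params.get("Tipo", params.get("Tipo_Pasivo", ""))
--         rank, em = 2, ("📚" if tipo in ("Colegio", "Jardín", "Arriendo", "Otro") else "💳")
--     else:
--         rank, em = _RANGO.get(clase, (9, "🗂️"))
--     return rank, f"{em} {params.get('Descripcion', pid)} [{pid}]"
--
-- def _opciones_posicion(posiciones):
--     rows = []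
--     for pid, params in posiciones.items():
--         if pid.startswith("GAS_") or pid == "OTR_NO_CLASIFICADO":
--             continue
--         rank, label = _clave(pid, params)
--         i = 0
--         while i < len(rows) and (rows[i][0] < rank or (rows[i][0] == rank and not label < rows[i][1])):
--             i += 1
--         rows.insert(i, (rank, label, pid))
--     return [(pid, lbl) for _, lbl, pid in rows] + [
--         ("SIN_CLASIFICAR", "❓ Sin clasificar"),
--         ("OTR_NO_CLASIFICADO", "🗂️ Agregar a Otros"),
--     ]
-- ===== Notes on version B (the rewrite author's own statement) =====
-- stated objective: alternative
-- what changed: Replaces A's build-a-flat-list-then-stable-sort-by-(class-rank,label)-tuple with an online insertion sort: one combined clase->(rank,emoji) table and each surviving position is scanned into its sorted slot of the result as it is visited.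
import Mathlib
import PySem

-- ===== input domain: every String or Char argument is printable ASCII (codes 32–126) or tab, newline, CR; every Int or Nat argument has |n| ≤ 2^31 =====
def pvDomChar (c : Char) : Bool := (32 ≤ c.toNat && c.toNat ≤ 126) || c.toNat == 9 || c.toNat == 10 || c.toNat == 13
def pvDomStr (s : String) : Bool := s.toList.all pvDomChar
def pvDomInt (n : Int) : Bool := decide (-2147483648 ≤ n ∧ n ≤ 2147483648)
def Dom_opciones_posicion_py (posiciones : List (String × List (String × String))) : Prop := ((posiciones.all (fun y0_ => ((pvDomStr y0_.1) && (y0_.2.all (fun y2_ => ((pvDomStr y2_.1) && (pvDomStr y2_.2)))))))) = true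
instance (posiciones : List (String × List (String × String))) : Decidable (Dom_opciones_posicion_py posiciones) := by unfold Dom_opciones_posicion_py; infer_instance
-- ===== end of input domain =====

-- B places each surviving position directly into its sorted slot while scanning (online
-- insertion with one combined clase->(rank,emoji) table) instead of building a flat list
-- and stable-sorting it by the (rank, label) tuple afterwards (objective: alternative).

-- dict.get(k, d) on an association list (first match), shared lookup primitive
def dictGet {ν : Type} (ps : List (String × ν)) (k : String) (d : ν) : ν :=
  ((ps.find? (fun q => q.1 == k)).map (fun q => q.2)).getD d

-- ===== PORT A =====
def clasesEmoji : List (String × String) :=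
  [("Ingreso_Recurrente", "💰"), ("Pasivo_Estructural", "🏠"), ("Activo_Financiero", "📈"),
   ("Activo_Liquido", "🏦"), ("Activo_Real", "🏡"), ("Prevision_AFP", "🔵"),
   ("Objetivo_Ahorro", "🎯"), ("Otro", "🗂️")]

def tiposPasivoCompromiso : PySem.Set String :=
  PySem.Set.ofList ["Colegio", "Jardín", "Arriendo", "Otro"]

def emojiClase (pos : List (String × String)) : String :=
  let clase := dictGet pos "Clase" ""
  if clase == "Pasivo_Corto_Plazo" then
    let tipo := dictGet pos "Tipo" (dictGet pos "Tipo_Pasivo" "")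
    if PySem.Set.contains tiposPasivoCompromiso tipo then "📚" else "💳"
  else dictGet clasesEmoji clase "🗂️"

def ordenClase : List (String × Int) :=
  [("Ingreso_Recurrente", 0), ("Pasivo_Estructural", 1), ("Pasivo_Corto_Plazo", 2),
   ("Activo_Liquido", 3), ("Activo_Financiero", 4), ("Activo_Real", 5),
   ("Prevision_AFP", 6), ("Objetivo_Ahorro", 7), ("Otro", 8)]

def opciones_posicion_py (posiciones : List (String × List (String × String))) : List (String × String) :=
  let items : List (String × String × Int) := posiciones.foldl (fun acc p =>
    if PySem.Str.startswith p.1 "GAS_" || p.1 == "OTR_NO_CLASIFICADO" then acc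
    else
      let clase := dictGet p.2 "Clase" "Otro"
      let desc := dictGet p.2 "Descripcion" p.1
      let em := emojiClase p.2
      let label := em ++ " " ++ desc ++ " [" ++ p.1 ++ "]"
      acc ++ [(p.1, label, dictGet ordenClase clase 9)]) []
  let itemsSorted := PySem.List.sorted2 items (fun x => x.2.2) (fun x => x.2.1) false
  (itemsSorted.map (fun x => (x.1, x.2.1)))
    ++ [("SIN_CLASIFICAR", "❓ Sin clasificar")] ++ [("OTR_NO_CLASIFICADO", "🗂️ Agregar a Otros")]

-- ===== PORT B =====
-- one combined table: clase -> (rank, emoji)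
def rangoTable : List (String × (Int × String)) :=
  [("Ingreso_Recurrente", (0, "💰")), ("Pasivo_Estructural", (1, "🏠")),
   ("Activo_Liquido", (3, "🏦")), ("Activo_Financiero", (4, "📈")),
   ("Activo_Real", (5, "🏡")), ("Prevision_AFP", (6, "🔵")),
   ("Objetivo_Ahorro", (7, "🎯")), ("Otro", (8, "🗂️"))]

def bClave (pid : String) (params : List (String × String)) : Int × String :=
  let clase := dictGet params "Clase" "Otro"
  let re : Int × String :=
    if clase == "Pasivo_Corto_Plazo" then
      let tipo := dictGet params "Tipo" (dictGet params "Tipo_Pasivo" "")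
      (2, if ["Colegio", "Jardín", "Arriendo", "Otro"].contains tipo then "📚" else "💳")
    else dictGet rangoTable clase (9, "🗂️")
  (re.1, re.2 ++ " " ++ dictGet params "Descripcion" pid ++ " [" ++ pid ++ "]")

-- the while-scan + list.insert of Source B: skip rows whose (rank, label) key is ≤ the new key
def bInsert (rank : Int) (label pid : String) : List (Int × String × String) → List (Int × String × String)
  | [] => [(rank, label, pid)]
  | y :: ys =>
      if y.1 < rank ∨ (y.1 = rank ∧ ¬ label < y.2.1) then y :: bInsert rank label pid ys
      else (rank, label, pid) :: y :: ys

def opciones_posicion_py_alt (posiciones : List (String × List (String × String))) : List (String × String) :=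
  let rows : List (Int × String × String) := posiciones.foldl (fun res p =>
    if PySem.Str.startswith p.1 "GAS_" || p.1 == "OTR_NO_CLASIFICADO" then res
    else
      let rl := bClave p.1 p.2
      bInsert rl.1 rl.2 p.1 res) []
  rows.map (fun r => (r.2.2, r.2.1))
    ++ [("SIN_CLASIFICAR", "❓ Sin clasificar"), ("OTR_NO_CLASIFICADO", "🗂️ Agregar a Otros")]

-- ===== PRECONDITION & SPEC =====
def Spec_opciones_posicion_py (posiciones : List (String × List (String × String))) (out : List (String × String)) : Prop := out = opciones_posicion_py_alt posiciones
instance (posiciones : List (String × List (String × String))) (out : List (String × String)) : Decidable (Spec_opciones_posicion_py posiciones out) := by unfold Spec_opciones_posicion_py; infer_instance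

-- ===== CLAIM (what is proved, stated in full; the proofs are below) =====
def Claim_equal_opciones_posicion_py : Prop := ∀ (posiciones : List (String × List (String × String))), Dom_opciones_posicion_py posiciones → Spec_opciones_posicion_py posiciones (opciones_posicion_py posiciones)

-- ===== LEMMAS AND PROOFS =====

theorem dictGet_switch (ps : List (String × String)) (k v d1 d2 : String)
    (h1 : v ≠ d1) (h2 : v ≠ d2) : (dictGet ps k d1 = v) ↔ (dictGet ps k d2 = v) := by
  unfold dictGet
  cases ps.find? (fun q => q.1 == k) with
  | none => simp [Ne.symm h1, Ne.symm h2]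
  | some q => simp

theorem emoji_default (params : List (String × String)) :
    dictGet clasesEmoji (dictGet params "Clase" "") "🗂️"
      = dictGet clasesEmoji (dictGet params "Clase" "Otro") "🗂️" := by
  unfold dictGet
  cases params.find? (fun q => q.1 == "Clase") with
  | none => decide
  | some q => simp

theorem tipos_same (t : String) :
    PySem.Set.contains tiposPasivoCompromiso t
      = ["Colegio", "Jardín", "Arriendo", "Otro"].contains t := by
  have h : tiposPasivoCompromiso = (["Colegio", "Jardín", "Arriendo", "Otro"] : List String) := by decide
  rw [h]; rfl

theorem table_split (clase : String) (h : clase ≠ "Pasivo_Corto_Plazo") :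
    dictGet rangoTable clase ((9 : Int), "🗂️")
      = (dictGet ordenClase clase 9, dictGet clasesEmoji clase "🗂️") := by
  by_cases h1 : clase = "Ingreso_Recurrente"; · subst h1; decide
  by_cases h2 : clase = "Pasivo_Estructural"; · subst h2; decide
  by_cases h3 : clase = "Activo_Liquido"; · subst h3; decide
  by_cases h4 : clase = "Activo_Financiero"; · subst h4; decide
  by_cases h5 : clase = "Activo_Real"; · subst h5; decide
  by_cases h6 : clase = "Prevision_AFP"; · subst h6; decide
  by_cases h7 : clase = "Objetivo_Ahorro"; · subst h7; decide
  by_cases h8 : clase = "Otro"; · subst h8; decide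
  have e0 : ("Pasivo_Corto_Plazo" == clase) = false := beq_eq_false_iff_ne.mpr (Ne.symm h)
  have e1 : ("Ingreso_Recurrente" == clase) = false := beq_eq_false_iff_ne.mpr (Ne.symm h1)
  have e2 : ("Pasivo_Estructural" == clase) = false := beq_eq_false_iff_ne.mpr (Ne.symm h2)
  have e3 : ("Activo_Liquido" == clase) = false := beq_eq_false_iff_ne.mpr (Ne.symm h3)
  have e4 : ("Activo_Financiero" == clase) = false := beq_eq_false_iff_ne.mpr (Ne.symm h4)
  have e5 : ("Activo_Real" == clase) = false := beq_eq_false_iff_ne.mpr (Ne.symm h5)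
  have e6 : ("Prevision_AFP" == clase) = false := beq_eq_false_iff_ne.mpr (Ne.symm h6)
  have e7 : ("Objetivo_Ahorro" == clase) = false := beq_eq_false_iff_ne.mpr (Ne.symm h7)
  have e8 : ("Otro" == clase) = false := beq_eq_false_iff_ne.mpr (Ne.symm h8)
  simp [dictGet, rangoTable, ordenClase, clasesEmoji, List.find?, e0, e1, e2, e3, e4, e5, e6, e7, e8]

-- B's combined key computation = A's (rank, label) pair
theorem clave_eq (pid : String) (params : List (String × String)) :
    bClave pid params
      = (dictGet ordenClase (dictGet params "Clase" "Otro") 9,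
         emojiClase params ++ " " ++ dictGet params "Descripcion" pid ++ " [" ++ pid ++ "]") := by
  unfold bClave emojiClase
  by_cases hp : dictGet params "Clase" "Otro" = "Pasivo_Corto_Plazo"
  · have hp' : dictGet params "Clase" "" = "Pasivo_Corto_Plazo" :=
      (dictGet_switch params "Clase" "Pasivo_Corto_Plazo" "" "Otro" (by decide) (by decide)).2 hp
    have hord : dictGet ordenClase "Pasivo_Corto_Plazo" 9 = 2 := by decide
    simp only [hp, hp', tipos_same, beq_self_eq_true, if_true, hord]
  · have hp' : dictGet params "Clase" "" ≠ "Pasivo_Corto_Plazo" := fun hc =>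
      hp ((dictGet_switch params "Clase" "Pasivo_Corto_Plazo" "" "Otro" (by decide) (by decide)).1 hc)
    simp only [beq_iff_eq, hp, hp', if_false, table_split _ hp]
    rw [emoji_default]

theorem sorted2_append_singleton {α κ₁ κ₂ : Type} [LT κ₁] [DecidableLT κ₁] [LT κ₂] [DecidableLT κ₂]
    (l : List α) (x : α) (k1 : α → κ₁) (k2 : α → κ₂) :
    PySem.List.sorted2 (l ++ [x]) k1 k2 false
      = PySem.List.insertBy
          (fun a b => decide (k1 a < k1 b) || (!decide (k1 b < k1 a) && decide (k2 a < k2 b)))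
          x (PySem.List.sorted2 l k1 k2 false) := by
  simp [PySem.List.sorted2, List.foldl_append]

-- Source B's scan-and-insert is insertBy with the lexicographic (rank, label) rule, up to tuple order
theorem bInsert_insertBy (r : Int) (l p : String) (ys : List (String × String × Int)) :
    bInsert r l p (ys.map (fun x => (x.2.2, x.2.1, x.1)))
      = (PySem.List.insertBy
          (fun a b => decide (a.2.2 < b.2.2) || (!decide (b.2.2 < a.2.2) && decide (a.2.1 < b.2.1)))
          (p, l, r) ys).map (fun x => (x.2.2, x.2.1, x.1)) := by
  induction ys with
  | nil => rfl
  | cons y t ih =>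
    simp only [List.map_cons, PySem.List.insertBy, bInsert]
    by_cases h1 : y.2.2 < r
    · rw [if_pos (Or.inl h1)]
      have hc : (decide (r < y.2.2) || (!decide (y.2.2 < r) && decide (l < y.2.1))) = false := by
        simp [h1, not_lt_of_gt h1]
      simp only [hc, Bool.false_eq_true, if_false, List.map_cons, ih]
    · by_cases h2 : r < y.2.2
      · rw [if_neg (by rintro (h | ⟨he, _⟩) <;> omega)]
        have hc : (decide (r < y.2.2) || (!decide (y.2.2 < r) && decide (l < y.2.1))) = true := by
          simp [h2]
        simp only [hc, if_true, List.map_cons]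
      · have he : y.2.2 = r := by omega
        by_cases h3 : l < y.2.1
        · rw [if_neg (by rintro (h | ⟨_, hn⟩) <;> [omega; exact hn h3])]
          have hc : (decide (r < y.2.2) || (!decide (y.2.2 < r) && decide (l < y.2.1))) = true := by
            simp [h1, h2, h3]
          simp only [hc, if_true, List.map_cons]
        · rw [if_pos (Or.inr ⟨he, h3⟩)]
          have hc : (decide (r < y.2.2) || (!decide (y.2.2 < r) && decide (l < y.2.1))) = false := by
            simp [h1, h2, h3]
          simp only [hc, Bool.false_eq_true, if_false, List.map_cons, ih]

-- the two folds stay linked: B's state is the sorted image of A's item list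
theorem fold_eq (posiciones : List (String × List (String × String)))
    (items : List (String × String × Int)) (rows : List (Int × String × String))
    (h : rows = (PySem.List.sorted2 items (fun x => x.2.2) (fun x => x.2.1) false).map
          (fun x => (x.2.2, x.2.1, x.1))) :
    posiciones.foldl (fun res p =>
      if PySem.Str.startswith p.1 "GAS_" || p.1 == "OTR_NO_CLASIFICADO" then res
      else
        let rl := bClave p.1 p.2
        bInsert rl.1 rl.2 p.1 res) rows
    = (PySem.List.sorted2 (posiciones.foldl (fun acc p =>
        if PySem.Str.startswith p.1 "GAS_" || p.1 == "OTR_NO_CLASIFICADO" then acc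
        else
          let clase := dictGet p.2 "Clase" "Otro"
          let desc := dictGet p.2 "Descripcion" p.1
          let em := emojiClase p.2
          let label := em ++ " " ++ desc ++ " [" ++ p.1 ++ "]"
          acc ++ [(p.1, label, dictGet ordenClase clase 9)]) items)
        (fun x => x.2.2) (fun x => x.2.1) false).map (fun x => (x.2.2, x.2.1, x.1)) := by
  induction posiciones generalizing items rows with
  | nil => exact h
  | cons p ps ih =>
    simp only [List.foldl_cons]
    by_cases hg : (PySem.Str.startswith p.1 "GAS_" || p.1 == "OTR_NO_CLASIFICADO") = true
    · rw [if_pos hg, if_pos hg]; exact ih items rows h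
    · rw [if_neg hg, if_neg hg]
      apply ih
      rw [h, clave_eq, bInsert_insertBy, sorted2_append_singleton]

-- ===== VERDICT (by name: the statement is the Claim_ definition above) =====
theorem opciones_posicion_py_spec : Claim_equal_opciones_posicion_py := by
  intro posiciones _
  unfold Spec_opciones_posicion_py opciones_posicion_py opciones_posicion_py_alt
  simp only []
  rw [fold_eq posiciones [] [] (by rfl), List.map_map]
  simp [Function.comp]
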